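-- pv_equiv track=rewrite | github.com/lipracer/Python-tools | example.py | compressQue
-- ===== SOURCE A (Python) =====
-- def compressQue(que):
--     if len(que)==0:
--         return []
--     ret = [[que[0], que[0]+1]]
--     for i in range(1, len(que)):
--         if que[i] - que[i-1] != 1:
--             ret.append([que[i], que[i]+1])
--         else:
--             ret[-1][1]+=1
--     return ret
-- ===== SOURCE B (Python) =====
-- def compressQue(que):
--     out = []
--     i = 0
--     n = len(que)
--     while i < n:
--         j = i + 1
--         while j < n and que[j] - que[j-1] == 1:
--             j += 1
--         out.append([que[i], que[i] + (j - i)])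
--         i = j
--     return out
-- ===== Notes on version B (the rewrite author's own statement) =====
-- stated objective: alternative
-- what changed: B scans each maximal consecutive run with an inner pointer and emits its interval once, instead of A's incremental loop that appends a unit interval and mutates the last interval's end in place.
import Mathlib
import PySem

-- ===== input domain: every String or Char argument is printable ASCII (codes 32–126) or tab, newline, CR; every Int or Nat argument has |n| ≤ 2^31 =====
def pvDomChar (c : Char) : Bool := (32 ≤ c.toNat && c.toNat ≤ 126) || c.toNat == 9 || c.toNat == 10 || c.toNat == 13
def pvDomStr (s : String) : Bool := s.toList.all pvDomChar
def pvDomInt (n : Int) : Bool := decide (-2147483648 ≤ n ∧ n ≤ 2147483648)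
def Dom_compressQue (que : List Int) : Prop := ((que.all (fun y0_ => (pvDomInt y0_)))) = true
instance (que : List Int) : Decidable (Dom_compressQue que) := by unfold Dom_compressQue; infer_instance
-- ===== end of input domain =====

-- B replaces A's incremental last-interval mutation with a run-at-a-time scan (objective: alternative, same cost).

-- ===== PORT A =====
-- ret[-1][1] += 1 : bump the second entry of the last interval
def bumpLast : List (List Int) → List (List Int)
  | [] => []
  | [iv] => [iv.set 1 (iv.getD 1 0 + 1)]
  | iv :: r => iv :: bumpLast r

-- the 'for i in range(1, len(que))' loop: prev = que[i-1], x = que[i], ret the growing list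
def goA (prev : Int) (xs : List Int) (ret : List (List Int)) : List (List Int) :=
  match xs with
  | [] => ret
  | x :: r => if x - prev ≠ 1 then goA x r (ret ++ [[x, x + 1]]) else goA x r (bumpLast ret)

def compressQue (que : List Int) : List (List Int) :=
  match que with
  | [] => []
  | x :: r => goA x r [[x, x + 1]]

-- ===== PORT B =====
-- inner while loop: length of the maximal consecutive run after prev, and the remainder
def takeRun (prev : Int) (xs : List Int) : Nat × List Int :=
  match xs with
  | [] => (0, [])
  | x :: r => if x - prev = 1 then let p := takeRun x r; (p.1 + 1, p.2) else (0, x :: r)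

theorem takeRun_len (prev : Int) (xs : List Int) : (takeRun prev xs).2.length ≤ xs.length := by
  induction xs generalizing prev with
  | nil => simp [takeRun]
  | cons x r ih =>
    simp only [takeRun]
    split
    · exact le_trans (ih x) (Nat.le_succ _)
    · simp

def compressQue_alt (que : List Int) : List (List Int) :=
  match que with
  | [] => []
  | x :: r =>
    let p := takeRun x r
    [x, x + (p.1 : Int) + 1] :: compressQue_alt p.2
termination_by que.length
decreasing_by
  simp only [List.length_cons]
  exact Nat.lt_succ_of_le (takeRun_len x r)

-- ===== PRECONDITION & SPEC =====
def Spec_compressQue (que : List Int) (out : List (List Int)) : Prop := out = compressQue_alt que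
instance (que : List Int) (out : List (List Int)) : Decidable (Spec_compressQue que out) := by unfold Spec_compressQue; infer_instance

-- ===== CLAIM (what is proved, stated in full; the proofs are below) =====
def Claim_equal_compressQue : Prop := ∀ (que : List Int), Dom_compressQue que → Spec_compressQue que (compressQue que)

-- ===== LEMMAS AND PROOFS =====
theorem bumpLast_append (ret s : List (List Int)) (hs : s ≠ []) :
    bumpLast (ret ++ s) = ret ++ bumpLast s := by
  induction ret with
  | nil => simp
  | cons iv r ih =>
    cases r with
    | nil =>
      cases s with
      | nil => exact absurd rfl hs
      | cons a t => simp [bumpLast]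
    | cons iv2 r2 =>
      simp only [List.cons_append, bumpLast]
      simpa using ih

theorem bumpLast_ne (s : List (List Int)) (hs : s ≠ []) : bumpLast s ≠ [] := by
  cases s with
  | nil => exact absurd rfl hs
  | cons a t => cases t <;> simp [bumpLast]

theorem goA_append (xs : List Int) (prev : Int) (ret s : List (List Int)) (hs : s ≠ []) :
    goA prev xs (ret ++ s) = ret ++ goA prev xs s := by
  induction xs generalizing prev ret s with
  | nil => simp [goA]
  | cons x r ih =>
    simp only [goA]
    split
    · rw [List.append_assoc, ih x ret (s ++ [[x, x + 1]]) (by simp)]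
    · rw [bumpLast_append ret s hs, ih x ret (bumpLast s) (bumpLast_ne s hs)]

theorem goA_run (xs : List Int) (prev a b : Int) :
    goA prev xs [[a, b]] =
      [a, b + ((takeRun prev xs).1 : Int)] :: compressQue_alt (takeRun prev xs).2 := by
  induction xs generalizing prev a b with
  | nil => simp [goA, takeRun, compressQue_alt]
  | cons x r ih =>
    by_cases h : x - prev = 1
    · have e1 : goA prev (x :: r) [[a, b]] = goA x r [[a, b + 1]] := by
        simp [goA, h, bumpLast, List.set]
      have e2 : takeRun prev (x :: r) = ((takeRun x r).1 + 1, (takeRun x r).2) := by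
        simp [takeRun, h]
      rw [e1, ih, e2]
      push_cast
      ring_nf
    · have e1 : goA prev (x :: r) [[a, b]] = goA x r ([[a, b]] ++ [[x, x + 1]]) := by
        simp [goA, h]
      have e2 : takeRun prev (x :: r) = (0, x :: r) := by
        simp [takeRun, h]
      rw [e1, goA_append r x [[a, b]] [[x, x + 1]] (by simp), ih, e2]
      simp only [compressQue_alt]
      push_cast
      ring_nf
      simp

-- ===== VERDICT (by name: the statement is the Claim_ definition above) =====
theorem compressQue_spec : Claim_equal_compressQue := by
  intro que _
  unfold Spec_compressQue
  cases que with
  | nil => simp [compressQue, compressQue_alt]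
  | cons x r =>
    simp only [compressQue, compressQue_alt, goA_run]
    ring_nf
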